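-- pv_equiv track=rewrite | github.com/Aasthaengg/IBMdataset | Python_codes/p03148/s548577337.py | solve
-- ===== SOURCE A (Python) =====
-- def solve(n, k, t, d):
--     que = []
--     used = set()
--     base_score = 0
--     for ti, di in sorted(zip(t, d), key=lambda _:-_[1])[:k]:
--         if ti in used:
--             que.append(di)
--         else:
--             used.add(ti)
--         base_score += di
--     num = len(used)
--     best = base_score + num**2
--
--     M = {}
--     for ti, di in zip(t, d):
--         if not ti in used:
--             if not ti in M:
--                 M[ti] = 0
--             M[ti] = max(M[ti], di)
--
--     que = sorted(que)
--     for i, p in enumerate(sorted(M.values())[::-1][:len(que)]):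
--         base_score += p - que[i]
--         num += 1
--         best = max(best, base_score + num**2)
--     return best
-- ===== SOURCE B (Python) =====
-- def solve(n, k, t, d):
--     # One partition pass over the single descending sort, then closed-form
--     # maximisation over the number s of extra types via prefix sums.
--     order = sorted(zip(t, d), key=lambda p: -p[1])
--     firsts = []
--     others = []
--     seen = set()
--     num0 = 0
--     m = 0
--     for idx, (ti, di) in enumerate(order):
--         if ti in seen:
--             others.append(di)
--             if idx < k:
--                 m += 1
--         else:
--             seen.add(ti)
--             firsts.append(di)
--             if idx < k:
--                 num0 += 1
--     F0 = sum(firsts[:num0])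
--     C = [0]
--     for v in firsts[num0:]:
--         C.append(C[-1] + max(v, 0))
--     O = [0]
--     for v in others[:m]:
--         O.append(O[-1] + v)
--     return max(F0 + C[s] + O[m - s] + (num0 + s) ** 2
--                for s in range(min(m, len(firsts) - num0) + 1))
-- ===== Notes on version B (the rewrite author's own statement) =====
-- stated objective: alternative
-- what changed: B replaces A's three-phase greedy simulation (top-k slice with a dup queue, a per-type max dict rebuilt from the unsorted input, three sorts, and a step-by-step swap loop with running accumulators) by one partition pass over the single descending sort into first-occurrence and repeat values, prefix-sum tables over the two parts, and a closed-form maximisation of F0 + C[s] + O[m-s] + (num0+s)^2 over the number s of extra types; no swap is simulated.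
-- outside the precondition, e.g. on solve(2, -1, [1, 2], [5, 3]): A returns 6, B returns 0
import Mathlib
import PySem

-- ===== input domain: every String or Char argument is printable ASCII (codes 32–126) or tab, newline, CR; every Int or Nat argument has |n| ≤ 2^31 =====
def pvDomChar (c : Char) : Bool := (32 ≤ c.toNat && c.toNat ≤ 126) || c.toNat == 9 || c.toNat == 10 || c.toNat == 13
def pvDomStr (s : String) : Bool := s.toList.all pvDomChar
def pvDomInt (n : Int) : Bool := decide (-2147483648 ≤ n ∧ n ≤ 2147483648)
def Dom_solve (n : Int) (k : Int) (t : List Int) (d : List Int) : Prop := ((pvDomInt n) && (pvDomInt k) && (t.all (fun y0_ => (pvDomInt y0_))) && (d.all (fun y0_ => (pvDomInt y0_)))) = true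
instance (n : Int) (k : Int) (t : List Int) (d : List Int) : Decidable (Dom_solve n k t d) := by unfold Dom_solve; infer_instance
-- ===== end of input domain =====

-- B replaces A's three-phase greedy simulation (top-k slice with dup queue, per-type max
-- dict, three sorts, incremental swap loop) by one partition pass over the single
-- descending sort plus prefix sums and a closed-form max over the number of extra types;
-- objective: alternative (same asymptotic cost, different decomposition).

-- ===== PORT A =====
-- loop body of A's first loop (state: que, used, base_score)
def solveStep1 (acc : List Int × PySem.Set Int × Int) (p : Int × Int) : List Int × PySem.Set Int × Int :=
  if PySem.Set.contains acc.2.1 p.1 then (acc.1 ++ [p.2], acc.2.1, acc.2.2 + p.2)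
  else (acc.1, PySem.Set.add acc.2.1 p.1, acc.2.2 + p.2)

-- loop body of A's M-building loop
def solveStepM (used : PySem.Set Int) (M : PySem.Dict Int Int) (p : Int × Int) : PySem.Dict Int Int :=
  if PySem.Set.contains used p.1 then M
  else
    let M1 := if M.contains p.1 then M else M.insert p.1 0
    M1.insert p.1 (max (M1.getD p.1 0) p.2)

-- loop body of A's final swap loop (state: base_score, num, best)
def solveStepSwap (que : List Int) (acc : Int × Int × Int) (ip : Int × Int) : Int × Int × Int :=
  let base := acc.1 + (ip.2 - PySem.List.pyGetD que ip.1 0)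
  let num := acc.2.1 + 1
  (base, num, max acc.2.2 (base + num ^ 2))

def solve (n : Int) (k : Int) (t : List Int) (d : List Int) : Int :=
  let pairs := List.zip t d
  let chosen := PySem.List.slice (PySem.List.sorted pairs (fun p => -p.2)) none (some k)
  let st := chosen.foldl solveStep1 ([], PySem.Set.empty, 0)
  let num := PySem.Set.len st.2.1
  let best := st.2.2 + num ^ 2
  let M := pairs.foldl (solveStepM st.2.1) PySem.Dict.empty
  let que := PySem.List.sorted st.1 (fun x => x)
  let ps := PySem.List.slice (PySem.List.sorted M.values (fun x => x)).reverse none (some (que.length : Int))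
  let fin := (PySem.List.enumerate ps).foldl (solveStepSwap que) (st.2.2, num, best)
  fin.2.2

-- ===== PORT B =====
-- loop body of B's partition pass (state: firsts, others, seen, num0, m)
def altPart (k : Int) (acc : List Int × List Int × PySem.Set Int × Int × Int)
    (ip : Int × (Int × Int)) : List Int × List Int × PySem.Set Int × Int × Int :=
  if PySem.Set.contains acc.2.2.1 ip.2.1 then
    (acc.1, acc.2.1 ++ [ip.2.2], acc.2.2.1, acc.2.2.2.1,
      if ip.1 < k then acc.2.2.2.2 + 1 else acc.2.2.2.2)
  else
    (acc.1 ++ [ip.2.2], acc.2.1, PySem.Set.add acc.2.2.1 ip.2.1,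
      (if ip.1 < k then acc.2.2.2.1 + 1 else acc.2.2.2.1), acc.2.2.2.2)

-- loop body of B's prefix-table loops: L.append(L[-1] + f(v)); L[-1] via pyGetD (L is never empty)
def altPref (f : Int → Int) (L : List Int) (v : Int) : List Int :=
  L ++ [PySem.List.pyGetD L (-1) 0 + f v]

def solve_alt (n : Int) (k : Int) (t : List Int) (d : List Int) : Int :=
  let order := PySem.List.sorted (List.zip t d) (fun p => -p.2)
  let st := (PySem.List.enumerate order).foldl (altPart k) ([], [], PySem.Set.empty, 0, 0)
  let firsts := st.1
  let others := st.2.1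
  let num0 := st.2.2.2.1
  let m := st.2.2.2.2
  let F0 := (PySem.List.slice firsts none (some num0)).sum
  let C := (PySem.List.slice firsts (some num0) none).foldl (altPref (fun v => max v 0)) [0]
  let O := (PySem.List.slice others none (some m)).foldl (altPref (fun v => v)) [0]
  let vals := (PySem.List.pyRange 0 (min m ((firsts.length : Int) - num0) + 1) 1).map
      (fun s => F0 + PySem.List.pyGetD C s 0 + PySem.List.pyGetD O (m - s) 0 + (num0 + s) ^ 2)
  -- max(generator): the range is never empty, so Python's max returns; getD 0 is unreachable
  (PySem.List.max? vals (fun x => x)).getD 0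

-- ===== PRECONDITION & SPEC =====
-- Pre_ restricts k to the problem's natural domain (a count, 0 ≤ k): for negative k A's
-- slice [:k] accidentally selects all but the last |k| items, an artefact B does not mimic.
def Pre_solve (n : Int) (k : Int) (t : List Int) (d : List Int) : Prop := 0 ≤ k
instance (n : Int) (k : Int) (t : List Int) (d : List Int) : Decidable (Pre_solve n k t d) := by
  unfold Pre_solve; infer_instance

def pvWitness_solve : Int × Int × List Int × List Int := (3, 2, [1, 1, 2], [5, 4, 3])

def Spec_solve (n : Int) (k : Int) (t : List Int) (d : List Int) (out : Int) : Prop := out = solve_alt n k t d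
instance (n : Int) (k : Int) (t : List Int) (d : List Int) (out : Int) : Decidable (Spec_solve n k t d out) := by unfold Spec_solve; infer_instance

-- ===== CLAIM (what is proved, stated in full; the proofs are below) =====
def Claim_equal_solve : Prop := ∀ (n : Int) (k : Int) (t : List Int) (d : List Int), Dom_solve n k t d → Pre_solve n k t d → Spec_solve n k t d (solve n k t d)

-- ===== LEMMAS AND PROOFS =====

-- the duplicate-deliciousness list both passes build
def dupsF (seen : PySem.Set Int) : List (Int × Int) → List Int
  | [] => []
  | p :: l => if PySem.Set.contains seen p.1 then p.2 :: dupsF seen l else dupsF (PySem.Set.add seen p.1) l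

-- first-occurrence pairs of types not yet seen
def candsP (seen : PySem.Set Int) : List (Int × Int) → List (Int × Int)
  | [] => []
  | p :: l => if PySem.Set.contains seen p.1 then candsP seen l else p :: candsP (PySem.Set.add seen p.1) l

-- A's per-type dict value: max of 0 and the d's of a type
def vmax (l : List (Int × Int)) (ty : Int) : Int :=
  ((l.filter (fun q => q.1 == ty)).map (·.2)).foldl max 0

-- A's M-loop body without the 'used' test
def gM (M : PySem.Dict Int Int) (p : Int × Int) : PySem.Dict Int Int :=
  let M1 := if M.contains p.1 then M else M.insert p.1 0
  M1.insert p.1 (max (M1.getD p.1 0) p.2)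

-- the core of A's swap loop, over (candidate, duplicate) pairs
def swapCore (acc : Int × Int × Int) (pq : Int × Int) : Int × Int × Int :=
  let base := acc.1 + (pq.1 - pq.2)
  (base, acc.2.1 + 1, max acc.2.2 (base + (acc.2.1 + 1) * (acc.2.1 + 1)))

-- the per-step scores A's swap loop maximises over
def scores : List (Int × Int) → Int → Int → List Int
  | [], _, _ => []
  | p :: L, base, num => (base + (p.1 - p.2) + (num + 1) * (num + 1)) :: scores L (base + (p.1 - p.2)) (num + 1)

theorem lemA1 (l : List (Int × Int)) (que : List Int) (seen : PySem.Set Int) (base : Int) :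
    l.foldl solveStep1 (que, seen, base) =
      (que ++ dupsF seen l, PySem.Set.update seen (l.map (·.1)), base + (l.map (·.2)).sum) := by
  induction l generalizing que seen base with
  | nil => simp [dupsF, PySem.Set.update_nil]
  | cons p l ih =>
    simp only [List.foldl_cons, List.map_cons, List.sum_cons, PySem.Set.update_cons]
    by_cases h : p.1 ∈ (seen : List Int)
    · have hc : PySem.Set.contains seen p.1 = true := (PySem.Set.contains_iff seen p.1).mpr h
      simp only [solveStep1, hc, if_true]
      rw [ih, PySem.Set.add_of_mem h]
      simp [dupsF, h, hc, List.append_assoc, add_assoc]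
    · have hc : PySem.Set.contains seen p.1 = false := by
        rw [Bool.eq_false_iff]; intro hcc; exact h ((PySem.Set.contains_iff seen p.1).mp hcc)
      simp only [solveStep1, hc, Bool.false_eq_true, if_false]
      rw [ih]
      simp [dupsF, h, hc, add_assoc]

theorem lemPart_top (k : Int) (l : List (Int × Int)) (s : Int) (fs os : List Int)
    (seen : PySem.Set Int) (n0 m : Int) (hk : s + l.length ≤ k) :
    (PySem.List.enumerate l s).foldl (altPart k) (fs, os, seen, n0, m) =
      (fs ++ (candsP seen l).map (·.2), os ++ dupsF seen l, PySem.Set.update seen (l.map (·.1)),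
        n0 + ((candsP seen l).length : Int), m + ((dupsF seen l).length : Int)) := by
  induction l generalizing s fs os seen n0 m with
  | nil => simp [candsP, dupsF, PySem.Set.update_nil]
  | cons p l ih =>
    rw [PySem.List.enumerate_cons]
    simp only [List.foldl_cons, List.map_cons, PySem.Set.update_cons]
    have hsk : s < k := by
      simp only [List.length_cons] at hk; push_cast at hk; omega
    have hk' : s + 1 + l.length ≤ k := by
      simp only [List.length_cons] at hk; push_cast at hk ⊢; omega
    by_cases h : p.1 ∈ (seen : List Int)
    · have hcc : PySem.Set.contains seen p.1 = true := (PySem.Set.contains_iff seen p.1).mpr h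
      simp only [altPart, hcc, if_true, hsk]
      rw [ih _ _ _ _ _ _ hk', PySem.Set.add_of_mem h]
      simp only [candsP, dupsF, hcc, if_true]
      simp [List.append_assoc]
      push_cast
      ring
    · have hcc : PySem.Set.contains seen p.1 = false := by
        rw [Bool.eq_false_iff]; intro hx; exact h ((PySem.Set.contains_iff seen p.1).mp hx)
      simp only [altPart, hcc, Bool.false_eq_true, if_false, hsk, if_true]
      rw [ih _ _ _ _ _ _ hk']
      simp only [candsP, dupsF, hcc, Bool.false_eq_true, if_false]
      simp [List.append_assoc]
      push_cast
      ring

theorem lemPart_rest (k : Int) (l : List (Int × Int)) (s : Int) (fs os : List Int)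
    (seen : PySem.Set Int) (n0 m : Int) (hk : k ≤ s) :
    (PySem.List.enumerate l s).foldl (altPart k) (fs, os, seen, n0, m) =
      (fs ++ (candsP seen l).map (·.2), os ++ dupsF seen l, PySem.Set.update seen (l.map (·.1)),
        n0, m) := by
  induction l generalizing s fs os seen with
  | nil => simp [candsP, dupsF, PySem.Set.update_nil]
  | cons p l ih =>
    rw [PySem.List.enumerate_cons]
    simp only [List.foldl_cons, List.map_cons, PySem.Set.update_cons]
    have hsk : ¬ (s < k) := by omega
    have hk' : k ≤ s + 1 := by omega
    by_cases h : p.1 ∈ (seen : List Int)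
    · have hcc : PySem.Set.contains seen p.1 = true := (PySem.Set.contains_iff seen p.1).mpr h
      simp only [altPart, hcc, if_true, hsk, if_false]
      rw [ih _ _ _ _ hk', PySem.Set.add_of_mem h]
      simp only [candsP, dupsF, hcc, if_true]
      simp [List.append_assoc]
    · have hcc : PySem.Set.contains seen p.1 = false := by
        rw [Bool.eq_false_iff]; intro hx; exact h ((PySem.Set.contains_iff seen p.1).mp hx)
      simp only [altPart, hcc, Bool.false_eq_true, if_false, hsk, if_false]
      rw [ih _ _ _ _ hk']
      simp only [candsP, dupsF, hcc, Bool.false_eq_true, if_false]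
      simp [List.append_assoc]

theorem dupsF_sublist (seen : PySem.Set Int) (l : List (Int × Int)) :
    List.Sublist (dupsF seen l) (l.map (·.2)) := by
  induction l generalizing seen with
  | nil => simp [dupsF]
  | cons p l ih =>
    simp only [dupsF, List.map_cons]
    split
    · exact (ih seen).cons₂ _
    · exact (ih _).cons _

theorem candsP_sublist (seen : PySem.Set Int) (l : List (Int × Int)) :
    List.Sublist (candsP seen l) l := by
  induction l generalizing seen with
  | nil => simp [candsP]
  | cons p l ih =>
    simp only [candsP]
    split
    · exact (ih seen).cons _
    · exact (ih _).cons₂ _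

theorem mem_candsP_types (seen : PySem.Set Int) (l : List (Int × Int)) (ty : Int) :
    ty ∈ (candsP seen l).map (·.1) ↔ ty ∈ l.map (·.1) ∧ ty ∉ (seen : List Int) := by
  induction l generalizing seen with
  | nil => simp [candsP]
  | cons p l ih =>
    simp only [candsP, List.map_cons, List.mem_cons]
    by_cases h : PySem.Set.contains seen p.1 = true
    · have hm : p.1 ∈ (seen : List Int) := (PySem.Set.contains_iff seen p.1).mp h
      rw [if_pos h, ih]
      constructor
      · rintro ⟨h1, h2⟩; exact ⟨Or.inr h1, h2⟩
      · rintro ⟨h1 | h1, h2⟩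
        · exact absurd (h1 ▸ hm) h2
        · exact ⟨h1, h2⟩
    · have hm : p.1 ∉ (seen : List Int) := fun hh => h ((PySem.Set.contains_iff seen p.1).mpr hh)
      rw [if_neg h]
      simp only [List.map_cons, List.mem_cons, ih, PySem.Set.mem_add]
      constructor
      · rintro (rfl | ⟨h1, h2⟩)
        · exact ⟨Or.inl rfl, hm⟩
        · exact ⟨Or.inr h1, fun hx => h2 (Or.inl hx)⟩
      · rintro ⟨h1 | h1, h2⟩
        · exact Or.inl h1
        · by_cases he : ty = p.1
          · exact Or.inl he
          · exact Or.inr ⟨h1, fun hx => hx.elim h2 he⟩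

theorem nodup_candsP_types (seen : PySem.Set Int) (l : List (Int × Int)) (hs : (seen : List Int).Nodup) :
    ((candsP seen l).map (·.1)).Nodup := by
  induction l generalizing seen with
  | nil => simp [candsP]
  | cons p l ih =>
    simp only [candsP]
    split
    · exact ih seen hs
    · simp only [List.map_cons, List.nodup_cons]
      refine ⟨fun hmem => ?_, ih _ (PySem.Set.nodup_add seen p.1 hs)⟩
      have := ((mem_candsP_types _ l p.1).mp hmem).2
      exact this ((PySem.Set.mem_add seen p.1 p.1).mpr (Or.inr rfl))

theorem candsP_first (seen : PySem.Set Int) (l : List (Int × Int)) (q : Int × Int)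
    (hq : q ∈ candsP seen l) : (l.filter (fun r => r.1 == q.1)).head? = some q := by
  induction l generalizing seen with
  | nil => simp [candsP] at hq
  | cons p l ih =>
    simp only [candsP] at hq
    by_cases h : PySem.Set.contains seen p.1 = true
    · rw [if_pos h] at hq
      have hq1 : q.1 ∉ (seen : List Int) :=
        ((mem_candsP_types seen l q.1).mp (List.mem_map_of_mem hq)).2
      have hne : (p.1 == q.1) = false := by
        simp only [beq_eq_false_iff_ne, ne_eq]
        intro e
        exact hq1 (e ▸ (PySem.Set.contains_iff seen p.1).mp h)
      simp only [List.filter_cons, hne, Bool.false_eq_true, if_false]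
      exact ih seen hq
    · rw [if_neg h] at hq
      rcases List.mem_cons.mp hq with rfl | hq'
      · simp [List.filter_cons]
      · have hq1 : q.1 ∉ ((PySem.Set.add seen p.1) : List Int) :=
          ((mem_candsP_types _ l q.1).mp (List.mem_map_of_mem hq')).2
        have hne : (p.1 == q.1) = false := by
          simp only [beq_eq_false_iff_ne, ne_eq]
          intro e
          exact hq1 ((PySem.Set.mem_add seen p.1 q.1).mpr (Or.inr e.symm))
        simp only [List.filter_cons, hne, Bool.false_eq_true, if_false]
        exact ih _ hq'

theorem len_update_candsP (seen : PySem.Set Int) (l : List (Int × Int)) :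
    (((PySem.Set.update seen (l.map (·.1))) : List Int)).length =
      ((seen : List Int)).length + (candsP seen l).length := by
  induction l generalizing seen with
  | nil => simp [candsP, PySem.Set.update_nil]
  | cons p l ih =>
    simp only [List.map_cons, PySem.Set.update_cons, candsP]
    by_cases h : p.1 ∈ (seen : List Int)
    · have hcc : PySem.Set.contains seen p.1 = true := (PySem.Set.contains_iff seen p.1).mpr h
      rw [PySem.Set.add_of_mem h, if_pos hcc]
      exact ih seen
    · have hcc : PySem.Set.contains seen p.1 = false := by
        rw [Bool.eq_false_iff]; intro hx; exact h ((PySem.Set.contains_iff seen p.1).mp hx)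
      rw [if_neg (by rw [hcc]; simp)]
      rw [ih (PySem.Set.add seen p.1), PySem.Set.add_of_not_mem h]
      simp
      omega

theorem sum_split_candsP (seen : PySem.Set Int) (l : List (Int × Int)) :
    (l.map (·.2)).sum = ((candsP seen l).map (·.2)).sum + (dupsF seen l).sum := by
  induction l generalizing seen with
  | nil => simp [candsP, dupsF]
  | cons p l ih =>
    simp only [List.map_cons, List.sum_cons, candsP, dupsF]
    by_cases h : PySem.Set.contains seen p.1 = true
    · rw [if_pos h, if_pos h]
      simp only [List.sum_cons]
      rw [ih seen]
      ring
    · rw [if_neg h, if_neg h]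
      simp only [List.map_cons, List.sum_cons]
      rw [ih (PySem.Set.add seen p.1)]
      ring

theorem vmax_append (l : List (Int × Int)) (p : Int × Int) (ty : Int) :
    vmax (l ++ [p]) ty = if ty = p.1 then max (vmax l ty) p.2 else vmax l ty := by
  unfold vmax
  rw [List.filter_append]
  by_cases h : ty = p.1
  · subst h
    simp [List.filter_cons, List.foldl_append]
  · have hb : (p.1 == ty) = false := by simp [beq_eq_false_iff_ne, Ne.symm h]
    simp [List.filter_cons, hb, h]

theorem vmax_of_not_mem (l : List (Int × Int)) (ty : Int) (h : ty ∉ l.map (·.1)) :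
    vmax l ty = 0 := by
  unfold vmax
  have he : l.filter (fun q => q.1 == ty) = [] := by
    rw [List.filter_eq_nil_iff]
    intro x hx
    simp only [beq_iff_eq]
    intro e
    exact h (e ▸ List.mem_map_of_mem hx)
  simp [he]

theorem lemMfilter (used : PySem.Set Int) (l : List (Int × Int)) (D : PySem.Dict Int Int) :
    l.foldl (solveStepM used) D = (l.filter (fun p => !(PySem.Set.contains used p.1))).foldl gM D := by
  rw [← PySem.List.foldl_if_eq_foldl_filter]
  apply PySem.List.foldl_congr_mem
  intro acc x _
  unfold solveStepM gM
  cases h : PySem.Set.contains used x.1 <;> simp [h]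

theorem lemM (lf : List (Int × Int)) :
    (lf.foldl gM PySem.Dict.empty).items =
      (PySem.Set.ofList (lf.map (·.1))).map (fun ty => (ty, vmax lf ty)) := by
  induction lf using List.reverseRecOn with
  | nil => rfl
  | append_singleton l p ih =>
    rw [List.foldl_append, List.foldl_cons, List.foldl_nil]
    have hkeys : (l.foldl gM PySem.Dict.empty).keys = PySem.Set.ofList (l.map (·.1)) := by
      show ((l.foldl gM PySem.Dict.empty).items).map (·.1) = _
      rw [ih, List.map_map]
      show (PySem.Set.ofList (l.map (·.1))).map (fun ty => ty) = PySem.Set.ofList (l.map (·.1))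
      exact List.map_id' _
    have hnodup : (l.foldl gM PySem.Dict.empty).keys.Nodup := by
      rw [hkeys]; exact PySem.Set.nodup_ofList _
    rw [List.map_append]
    simp only [List.map_cons, List.map_nil]
    rw [PySem.Set.ofList_append_singleton]
    by_cases hmem : p.1 ∈ PySem.Set.ofList (l.map (·.1))
    · have hcont : (l.foldl gM PySem.Dict.empty).contains p.1 = true :=
        (PySem.Dict.contains_iff_mem_keys _ p.1).mpr (by rw [hkeys]; exact hmem)
      have hgetD : (l.foldl gM PySem.Dict.empty).getD p.1 0 = vmax l p.1 := by
        apply PySem.Dict.getD_of_mem_items _ ?_ hnodup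
        rw [ih]
        exact List.mem_map_of_mem hmem
      have hgm : gM (l.foldl gM PySem.Dict.empty) p
          = (l.foldl gM PySem.Dict.empty).insert p.1
              (max ((l.foldl gM PySem.Dict.empty).getD p.1 0) p.2) := by
        show (if (l.foldl gM PySem.Dict.empty).contains p.1 = true then l.foldl gM PySem.Dict.empty
            else (l.foldl gM PySem.Dict.empty).insert p.1 0).insert p.1
            (max ((if (l.foldl gM PySem.Dict.empty).contains p.1 = true then l.foldl gM PySem.Dict.empty
            else (l.foldl gM PySem.Dict.empty).insert p.1 0).getD p.1 0) p.2) = _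
        rw [hcont]
        simp
      rw [hgm]
      rw [PySem.Dict.items_insert_of_contains _ _ hcont, ih, List.map_map,
        PySem.Set.add_of_mem hmem, hgetD]
      apply List.map_congr_left
      intro ty _
      by_cases hpt : ty = p.1
      · subst hpt; simp [vmax_append]
      · have hb : (ty == p.1) = false := by simpa using hpt
        simp [Function.comp, hb, vmax_append, hpt]
    · have hcont : (l.foldl gM PySem.Dict.empty).contains p.1 = false := by
        rw [Bool.eq_false_iff]
        intro hx
        exact hmem (hkeys ▸ (PySem.Dict.contains_iff_mem_keys _ p.1).mp hx)
      have hgm : gM (l.foldl gM PySem.Dict.empty) p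
          = ((l.foldl gM PySem.Dict.empty).insert p.1 0).insert p.1
              (max (((l.foldl gM PySem.Dict.empty).insert p.1 0).getD p.1 0) p.2) := by
        show (if (l.foldl gM PySem.Dict.empty).contains p.1 = true then l.foldl gM PySem.Dict.empty
            else (l.foldl gM PySem.Dict.empty).insert p.1 0).insert p.1
            (max ((if (l.foldl gM PySem.Dict.empty).contains p.1 = true then l.foldl gM PySem.Dict.empty
            else (l.foldl gM PySem.Dict.empty).insert p.1 0).getD p.1 0) p.2) = _
        rw [hcont]
        simp
      rw [hgm]
      rw [PySem.Dict.getD_insert_self, PySem.Dict.items_insert_of_contains _ _ (PySem.Dict.contains_insert_self _ _ _),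
        PySem.Dict.items_insert_of_not_contains _ _ hcont, ih, PySem.Set.add_of_not_mem hmem]
      rw [List.map_append, List.map_append]
      congr 1
      · rw [List.map_map]
        apply List.map_congr_left
        intro ty hty
        have hpt : ty ≠ p.1 := fun e => hmem (e ▸ hty)
        have hb : (ty == p.1) = false := by simpa using hpt
        simp [Function.comp, hb, vmax_append, hpt]
      · have hvl : vmax l p.1 = 0 :=
          vmax_of_not_mem l p.1 (fun hx => hmem ((PySem.Set.mem_ofList _ _).mpr hx))
        simp [vmax_append, hvl]

theorem zip_take_length (C R : List Int) : (C.take R.length).zip R = C.zip R := by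
  induction R generalizing C with
  | nil => simp
  | cons r R ih =>
    cases C with
    | nil => simp
    | cons c C => simp [List.take_succ_cons, List.zip_cons_cons, ih]

theorem lemSwapA (P Q : List Int) (st : Int × Int × Int) (h : P.length ≤ Q.length) :
    (PySem.List.enumerate P).foldl (solveStepSwap Q) st = (P.zip Q).foldl swapCore st := by
  have hlen : PySem.List.len P = PySem.List.len (P.zip Q) := by
    simp [PySem.List.len_eq, List.length_zip]
    omega
  rw [PySem.List.enumerate_eq_map_pyRange P 0, List.foldl_map, hlen,
    ← PySem.List.foldl_pyRange_zero_pyGetD (P.zip Q) (0, 0) swapCore st]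
  apply PySem.List.foldl_congr_mem
  intro acc j hj
  rcases PySem.List.mem_pyRange_one.mp hj with ⟨hj0, hj1⟩
  rw [PySem.List.len_eq] at hj1
  have hjz : j < ((P.zip Q).length : Int) := hj1
  have hjP : j < (P.length : Int) := by
    rw [List.length_zip] at hj1; push_cast at hj1 ⊢; omega
  have hjQ : j < (Q.length : Int) := by
    push_cast at hjP ⊢; omega
  simp only [solveStepSwap, swapCore]
  rw [PySem.List.pyGetD_eq_getElem P 0 hj0 hjP,
    PySem.List.pyGetD_eq_getElem Q 0 hj0 hjQ,
    PySem.List.pyGetD_eq_getElem (P.zip Q) (0, 0) hj0 hjz,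
    List.getElem_zip]
  simp [pow_two]

theorem swapCore_scores (L : List (Int × Int)) (base num best : Int) :
    (L.foldl swapCore (base, num, best)).2.2 = (scores L base num).foldl max best := by
  induction L generalizing base num best with
  | nil => simp [scores]
  | cons p L ih =>
    simp only [List.foldl_cons, swapCore, scores]
    exact ih _ _ _

theorem scores_zip (C R : List Int) (base num : Int) :
    scores (C.zip R) base num = (List.range (min C.length R.length)).map
      (fun i => base + ((C.take (i + 1)).sum - (R.take (i + 1)).sum) + (num + (i : Int) + 1) * (num + (i : Int) + 1)) := by
  induction C generalizing R base num with
  | nil => simp [scores]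
  | cons c C ih =>
    cases R with
    | nil => simp [scores]
    | cons r R =>
      simp only [List.zip_cons_cons, scores, List.length_cons]
      rw [Nat.succ_min_succ, List.range_succ_eq_map, List.map_cons, List.map_map]
      congr 1
      · simp
      · rw [ih R (base + (c - r)) (num + 1)]
        apply List.map_congr_left
        intro i _
        simp only [Function.comp, List.take_succ_cons, List.sum_cons]
        push_cast
        ring

-- prefix-sum table: what B's append loop builds
def prefC (f : Int → Int) (xs : List Int) : List Int :=
  (List.range (xs.length + 1)).map (fun s => ((xs.take s).map f).sum)

theorem prefC_split (f : Int → Int) (xs : List Int) :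
    prefC f xs = (List.range xs.length).map (fun s => ((xs.take s).map f).sum) ++ [(xs.map f).sum] := by
  unfold prefC
  rw [List.range_succ, List.map_append]
  simp
  rw [List.take_of_length_le (by simp)]

theorem prefC_append (f : Int → Int) (xs : List Int) (v : Int) :
    prefC f (xs ++ [v]) = prefC f xs ++ [((xs ++ [v]).map f).sum] := by
  unfold prefC
  rw [List.length_append, List.length_singleton, List.range_succ, List.map_append]
  congr 1
  · apply List.map_congr_left
    intro s hs
    rw [List.mem_range] at hs
    rw [List.take_append_of_le_length (by omega)]
  · simp

theorem foldl_altPref (f : Int → Int) (xs : List Int) :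
    xs.foldl (altPref f) [0] = prefC f xs := by
  induction xs using List.reverseRecOn with
  | nil => rfl
  | append_singleton l v ih =>
    rw [List.foldl_append, List.foldl_cons, List.foldl_nil, ih]
    unfold altPref
    rw [prefC_append]
    congr 1
    rw [prefC_split, PySem.List.pyGetD_neg_one_append_singleton]
    simp [List.map_append]

theorem pyGetD_prefC (f : Int → Int) (xs : List Int) (s : Nat) (hs : s ≤ xs.length) :
    PySem.List.pyGetD (prefC f xs) (s : Int) 0 = ((xs.take s).map f).sum := by
  have hlen : ((s : Int)) < ((prefC f xs).length : Int) := by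
    unfold prefC
    simp
    omega
  rw [PySem.List.pyGetD_eq_getElem (prefC f xs) 0 (by positivity) hlen]
  unfold prefC
  rw [List.getElem_map, List.getElem_range]
  simp

theorem solve_eq_solve_alt (n k : Int) (t d : List Int) (hk : 0 ≤ k) :
    solve n k t d = solve_alt n k t d := by
  set pairs := List.zip t d with hpairsdef
  set s := PySem.List.sorted pairs (fun p => -p.2) with hsdef
  set m0 := k.toNat with hm0
  set top := s.take m0 with htop
  set rest := s.drop m0 with hrest
  set used := PySem.Set.ofList (top.map (·.1)) with hused
  set base := (top.map (·.2)).sum with hbase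
  set que0 := dupsF PySem.Set.empty top with hque0
  set fTop := (candsP PySem.Set.empty top).map (·.2) with hfTop
  set fRest := (candsP used rest).map (·.2) with hfRest
  set cands := (candsP used rest).map (fun q => max q.2 0) with hcands
  set lfM := pairs.filter (fun p => !(PySem.Set.contains used p.1)) with hlfMdef
  have hps : s.Pairwise (fun a b => b.2 ≤ a.2) := by
    have h1 := PySem.List.sorted_pairwise pairs (fun p => -p.2)
    rw [← hsdef] at h1
    exact h1.imp (fun h => by omega)
  have hsperm : s.Perm pairs := PySem.List.sorted_perm pairs _ _
  have hstr : top ++ rest = s := List.take_append_drop m0 s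
  have hrsub : List.Sublist rest s := by rw [← hstr]; exact List.sublist_append_right _ _
  have htsub : List.Sublist top s := by rw [← hstr]; exact List.sublist_append_left _ _
  have hA1 : top.foldl solveStep1 ([], PySem.Set.empty, 0) = (que0, used, base) := by
    rw [lemA1, PySem.Set.update_empty]
    simp only [List.nil_append, zero_add]
    rfl
  have hMv : (pairs.foldl (solveStepM used) PySem.Dict.empty).values
      = (PySem.Set.ofList (lfM.map (·.1))).map (vmax lfM) := by
    rw [lemMfilter]
    show ((lfM.foldl gM PySem.Dict.empty).items).map (·.2) = _
    rw [lemM, List.map_map]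
    rfl
  have hlen_top_le : (top.length : Int) ≤ k := by
    have h1 : top.length ≤ m0 := by rw [htop, List.length_take]; omega
    have h2 : (m0 : Int) = k := by rw [hm0]; exact Int.toNat_of_nonneg hk
    omega
  -- B's partition pass
  have hB : (PySem.List.enumerate s).foldl (altPart k) ([], [], PySem.Set.empty, 0, 0) =
      (fTop ++ fRest, que0 ++ dupsF used rest, PySem.Set.update used (rest.map (·.1)),
        (fTop.length : Int), (que0.length : Int)) := by
    conv_lhs => rw [← hstr]
    rw [PySem.List.enumerate_append, List.foldl_append,
      lemPart_top k top 0 [] [] PySem.Set.empty 0 0 (by simpa using hlen_top_le)]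
    simp only [PySem.Set.update_empty, List.nil_append, zero_add]
    rcases Nat.lt_or_ge m0 s.length with hlt | hge
    · have htl : top.length = m0 := by rw [htop, List.length_take]; omega
      have h2 : (m0 : Int) = k := by rw [hm0]; exact Int.toNat_of_nonneg hk
      rw [lemPart_rest k rest _ _ _ _ _ _ (by rw [htl]; omega)]
      simp only [hused, hfTop, hque0, hfRest, List.length_map]
    · have hre : rest = [] := by rw [hrest, List.drop_eq_nil_iff]; omega
      rw [hre]
      simp only [PySem.List.enumerate_nil, List.foldl_nil, List.map_nil, PySem.Set.update_nil]
      simp [hfRest, hre, candsP, dupsF, hfTop, hque0, hused]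
  -- values of candidates: clamped per-type maxima
  have hval : ∀ q ∈ candsP used rest, max q.2 0 = vmax lfM q.1 := by
    intro q hq
    have hqnotused : q.1 ∉ (used : List Int) :=
      ((mem_candsP_types used rest q.1).mp (List.mem_map_of_mem hq)).2
    have hqrest : q ∈ rest := (candsP_sublist used rest).subset hq
    have htopnone : ∀ r ∈ top, ¬ ((r.1 == q.1) = true) := by
      intro r hr
      simp only [beq_iff_eq]
      intro e
      exact hqnotused ((PySem.Set.mem_ofList _ _).mpr (e ▸ List.mem_map_of_mem hr))
    have hfil : s.filter (fun r => r.1 == q.1) = rest.filter (fun r => r.1 == q.1) := by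
      rw [← hstr, List.filter_append, List.filter_eq_nil_iff.mpr htopnone, List.nil_append]
    have hhead : (rest.filter (fun r => r.1 == q.1)).head? = some q := candsP_first used rest q hq
    have hfil2 : lfM.filter (fun r => r.1 == q.1) = pairs.filter (fun r => r.1 == q.1) := by
      rw [hlfMdef, List.filter_filter]
      apply List.filter_congr
      intro r _
      cases he : (r.1 == q.1)
      · simp
      · have he' : r.1 = q.1 := by simpa using he
        have hnm : r.1 ∉ (used : List Int) := by rw [he']; exact hqnotused
        simp [hnm]
    have hpermf : (s.filter (fun r => r.1 == q.1)).Perm (pairs.filter (fun r => r.1 == q.1)) :=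
      hsperm.filter _
    obtain ⟨tl, htl⟩ : ∃ tl, rest.filter (fun r => r.1 == q.1) = q :: tl := by
      cases hx : rest.filter (fun r => r.1 == q.1) with
      | nil => rw [hx] at hhead; simp at hhead
      | cons a tl =>
        rw [hx] at hhead
        simp only [List.head?_cons, Option.some.injEq] at hhead
        exact ⟨tl, by rw [hhead]⟩
    have hpw : (q :: tl).Pairwise (fun a b => b.2 ≤ a.2) := by
      rw [← htl, ← hfil]
      exact hps.sublist List.filter_sublist
    have hmax : ((q :: tl).map (·.2)).foldl max 0 = max q.2 0 := by
      simp only [List.map_cons, List.foldl_cons]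
      rw [max_comm (0 : Int) q.2]
      refine le_antisymm ?_ (PySem.List.le_foldl_max (tl.map (·.2)) (max q.2 0)).1
      rcases PySem.List.foldl_max_mem (tl.map (·.2)) (max q.2 0) with h | h
      · rw [h]
      · rcases List.mem_map.mp h with ⟨r, hr, he⟩
        rw [← he]
        exact le_trans ((List.pairwise_cons.mp hpw).1 r hr) (le_max_left _ _)
    calc max q.2 0 = ((q :: tl).map (·.2)).foldl max 0 := hmax.symm
      _ = ((s.filter (fun r => r.1 == q.1)).map (·.2)).foldl max 0 := by rw [hfil, htl]
      _ = ((pairs.filter (fun r => r.1 == q.1)).map (·.2)).foldl max 0 := (hpermf.map _).foldl_eq _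
      _ = vmax lfM q.1 := by rw [vmax, hfil2]
  have hpermc : cands.Perm ((PySem.Set.ofList (lfM.map (·.1))).map (vmax lfM)) := by
    have h1 : cands = ((candsP used rest).map (·.1)).map (vmax lfM) := by
      rw [hcands, List.map_map]
      exact List.map_congr_left (fun q hq => hval q hq)
    rw [h1]
    apply List.Perm.map
    rw [List.perm_ext_iff_of_nodup
      (nodup_candsP_types used rest (PySem.Set.nodup_ofList _)) (PySem.Set.nodup_ofList _)]
    intro ty
    constructor
    · intro hmem
      rcases (mem_candsP_types used rest ty).mp hmem with ⟨h1m, h2m⟩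
      rcases List.mem_map.mp h1m with ⟨r, hr, rfl⟩
      rw [PySem.Set.mem_ofList]
      refine List.mem_map_of_mem ?_
      rw [hlfMdef, List.mem_filter]
      refine ⟨hsperm.mem_iff.mp (hrsub.subset hr), ?_⟩
      have hcf : PySem.Set.contains used r.1 = false :=
        Bool.eq_false_iff.mpr (fun hcc => h2m ((PySem.Set.contains_iff _ _).mp hcc))
      rw [hcf]
      rfl
    · intro h1m
      rw [PySem.Set.mem_ofList] at h1m
      rcases List.mem_map.mp h1m with ⟨r, hr, rfl⟩
      rw [hlfMdef, List.mem_filter] at hr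
      have hru : r.1 ∉ (used : List Int) := by
        intro hx
        have h3 := hr.2
        rw [(PySem.Set.contains_iff used r.1).mpr hx] at h3
        simp at h3
      have hrs : r ∈ s := hsperm.mem_iff.mpr hr.1
      rcases List.mem_append.mp (by rw [hstr]; exact hrs) with h | h
      · exact absurd ((PySem.Set.mem_ofList _ _).mpr (List.mem_map_of_mem h)) hru
      · exact (mem_candsP_types used rest r.1).mpr ⟨List.mem_map_of_mem h, hru⟩
  have hpw_s2 : (s.map (·.2)).Pairwise (fun a b => b ≤ a) := (List.pairwise_map).mpr hps
  have hpwc : cands.Pairwise (fun a b => b ≤ a) := by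
    have hsubp : List.Sublist (candsP used rest) s := (candsP_sublist used rest).trans hrsub
    have hpp : (candsP used rest).Pairwise (fun a b => b.2 ≤ a.2) := hps.sublist hsubp
    rw [hcands, List.pairwise_map]
    exact hpp.imp (fun h => max_le_max h le_rfl)
  have hpwq : que0.Pairwise (fun a b => b ≤ a) := by
    have hsub : List.Sublist que0 (s.map (·.2)) :=
      (dupsF_sublist _ top).trans (List.Sublist.map (·.2) htsub)
    exact hpw_s2.sublist hsub
  have hsq : PySem.List.sorted que0 (fun x => x) = que0.reverse :=
    PySem.List.sorted_id_eq_of_perm_of_pairwise _ _ (List.reverse_perm que0)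
      ((List.pairwise_reverse).mpr hpwq)
  have hMvs : PySem.List.sorted (pairs.foldl (solveStepM used) PySem.Dict.empty).values (fun x => x)
      = cands.reverse := by
    apply PySem.List.sorted_id_eq_of_perm_of_pairwise
    · rw [hMv]; exact (List.reverse_perm cands).trans hpermc
    · exact (List.pairwise_reverse).mpr hpwc
  -- facts tying A's counters to B's
  have hnum : PySem.Set.len used = (fTop.length : Int) := by
    have h1 := len_update_candsP PySem.Set.empty top
    rw [PySem.Set.update_empty] at h1
    have h2 : ((PySem.Set.empty : PySem.Set Int) : List Int).length = 0 := rfl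
    rw [h2] at h1
    simp only [PySem.Set.len, hused, hfTop, List.length_map]
    omega
  have hbase_split : base = fTop.sum + que0.sum := by
    rw [hbase, sum_split_candsP PySem.Set.empty top]
  have hcands_len : cands.length = fRest.length := by
    rw [hcands, hfRest]; simp
  -- reduce A to a swapCore fold over cands × que0.reverse
  have hAred : solve n k t d =
      ((cands.zip que0.reverse).foldl swapCore
        (base, (fTop.length : Int), base + (fTop.length : Int) ^ 2)).2.2 := by
    rw [solve]
    simp only [← hpairsdef, ← hsdef]
    rw [PySem.List.slice_to _ hk, ← hm0, ← htop, hA1]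
    simp only []
    rw [hMvs, hsq]
    simp only [List.reverse_reverse, List.length_reverse]
    rw [PySem.List.slice_to _ (by positivity : (0:Int) ≤ (que0.length : Int))]
    rw [Int.toNat_natCast]
    rw [lemSwapA (cands.take que0.length) que0.reverse _
      (by rw [List.length_reverse, List.length_take]; omega)]
    rw [show (cands.take que0.length).zip que0.reverse
        = (cands.take que0.reverse.length).zip que0.reverse from by rw [List.length_reverse]]
    rw [zip_take_length, hnum]
  -- reduce B to the same fold, via the score characterisations on both sides
  have hBred : solve_alt n k t d =
      ((cands.zip que0.reverse).foldl swapCore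
        (base, (fTop.length : Int), base + (fTop.length : Int) ^ 2)).2.2 := by
    rw [solve_alt]
    simp only [← hpairsdef, ← hsdef]
    rw [hB]
    simp only []
    -- the slices
    have hsl1 : PySem.List.slice (fTop ++ fRest) none (some ((fTop.length : Int))) = fTop := by
      rw [PySem.List.slice_to _ (by positivity), Int.toNat_natCast, List.take_left]
    have hsl2 : PySem.List.slice (fTop ++ fRest) (some ((fTop.length : Int))) none = fRest := by
      rw [PySem.List.slice_from _ (by positivity), Int.toNat_natCast, List.drop_left]
    have hsl3 : PySem.List.slice (que0 ++ dupsF used rest) none (some ((que0.length : Int))) = que0 := by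
      rw [PySem.List.slice_to _ (by positivity), Int.toNat_natCast, List.take_left]
    rw [hsl1, hsl2, hsl3, foldl_altPref, foldl_altPref]
    -- the zipped list and its scores
    set zipL := cands.zip que0.reverse with hzipdef
    have hzlen : zipL.length = min que0.length fRest.length := by
      rw [hzipdef, List.length_zip, hcands_len, List.length_reverse, Nat.min_comm]
    have hminN : min ((que0.length : Int)) (((fTop ++ fRest).length : Int) - (fTop.length : Int))
        = ((min que0.length fRest.length : Nat) : Int) := by
      rw [List.length_append]
      push_cast
      omega
    rw [hminN]
    set N := min que0.length fRest.length with hN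
    -- the mapped range of values equals (base + num0^2) :: scores zipL base num0
    have hvals : (PySem.List.pyRange 0 (((N : Nat) : Int) + 1) 1).map
        (fun sv => (fTop).sum + PySem.List.pyGetD (prefC (fun v => max v 0) fRest) sv 0
          + PySem.List.pyGetD (prefC (fun v => v) que0) (((que0.length : Int)) - sv) 0
          + ((fTop.length : Int) + sv) ^ 2)
        = (base + (fTop.length : Int) ^ 2) :: scores zipL base (fTop.length : Int) := by
      rw [show (((N : Nat) : Int) + 1) = (((N + 1 : Nat) : Nat) : Int) from by push_cast; ring]
      rw [PySem.List.pyRange_one]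
      simp only [sub_zero, Int.toNat_natCast, List.map_map]
      rw [scores_zip]
      have hlenmin : min cands.length que0.reverse.length = N := by
        rw [List.length_reverse, hcands_len, hN, Nat.min_comm]
      rw [hlenmin, List.range_succ_eq_map, List.map_cons, List.map_map]
      congr 1
      · -- s = 0 entry
        simp only [Function.comp, zero_add]
        have h0 : PySem.List.pyGetD (prefC (fun v => max v 0) fRest) ((0 : Nat) : Int) 0 = 0 := by
          rw [pyGetD_prefC _ _ 0 (by omega)]; simp
        have h1 : PySem.List.pyGetD (prefC (fun v => v) que0) (((que0.length : Int)) - ((0:Nat):Int)) 0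
            = que0.sum := by
          rw [show ((que0.length : Int)) - ((0:Nat):Int) = ((que0.length : Nat) : Int) from by push_cast; ring]
          rw [pyGetD_prefC _ _ que0.length (le_refl _)]
          simp
        simp only [Int.natCast_zero] at h0 h1 ⊢
        rw [h0, h1, hbase_split]
        ring
      · apply List.map_congr_left
        intro i hi
        rw [List.mem_range] at hi
        simp only [Function.comp, zero_add]
        have hiN1 : i + 1 ≤ fRest.length := by omega
        have hiq : i + 1 ≤ que0.length := by omega
        have hC : PySem.List.pyGetD (prefC (fun v => max v 0) fRest) (((i + 1 : Nat) : Nat) : Int) 0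
            = (cands.take (i + 1)).sum := by
          rw [pyGetD_prefC _ _ (i + 1) hiN1]
          simp only [hcands, hfRest, ← List.map_take, List.map_map]
          rfl
        have hO : PySem.List.pyGetD (prefC (fun v => v) que0) (((que0.length : Int)) - (((i + 1 : Nat) : Nat) : Int)) 0
            = (que0.take (que0.length - (i + 1))).sum := by
          rw [show ((que0.length : Int)) - (((i + 1 : Nat) : Nat) : Int)
              = (((que0.length - (i + 1) : Nat) : Nat) : Int) from by push_cast; omega]
          rw [pyGetD_prefC _ _ _ (by omega)]
          simp
        push_cast at hC hO ⊢
        rw [hC, hO]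
        have hrev : (que0.reverse.take (i + 1)).sum = que0.sum - (que0.take (que0.length - (i + 1))).sum := by
          have h1 : que0.reverse.take (i + 1) = (que0.drop (que0.length - (i + 1))).reverse := by
            rw [List.take_reverse]
          rw [h1, List.sum_reverse]
          have h2 := List.sum_take_add_sum_drop que0 (que0.length - (i + 1))
          omega
        rw [hrev, hbase_split]
        ring
    rw [hvals, PySem.List.max?_id_cons]
    simp only [Option.getD_some]
    rw [swapCore_scores]
  rw [hAred, hBred]

-- ===== VERDICT (by name: the statement is the Claim_ definition above) =====
theorem solve_spec : Claim_equal_solve := by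
  intro n k t d _ hpre
  exact solve_eq_solve_alt n k t d hpre
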